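-- pv_equiv track=rewrite | github.com/mrln13/EDX-Knot-Theory | Data Analysis/simulate_scan_order_from_cache.py | order_raster_col
-- ===== SOURCE A (Python) =====
-- from typing import List, Tuple, Dict, Optional
--
-- def _normalize_grid(coords_sorted: List[Tuple[int, int]]):
--     rmin = min(r for r, _ in coords_sorted)
--     rmax = max(r for r, _ in coords_sorted)
--     cmin = min(c for _, c in coords_sorted)
--     cmax = max(c for _, c in coords_sorted)
--     R = rmax - rmin + 1
--     C = cmax - cmin + 1
--     present = [[False] * C for _ in range(R)]
--     for r, c in coords_sorted:
--         present[r - rmin][c - cmin] = True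
--     return R, C, rmin, cmin, present
--
-- def _rotate_to_start(order: list[tuple[int,int]], start_rc: tuple[int,int] | None) -> list[tuple[int,int]]:
--     # Rotate a ready-made order so it *starts* at start_rc (or nearest if missing)
--     if not start_rc or not order:
--         return order
--     if start_rc in order:
--         k = order.index(start_rc)
--         return order[k:] + order[:k]
--     # fallback: rotate to nearest
--     sr, sc = start_rc
--     kmin, dmin = 0, abs(order[0][0]-sr) + abs(order[0][1]-sc)
--     for i,(r,c) in enumerate(order):
--         d = abs(r-sr) + abs(c-sc)
--         if d < dmin:
--             kmin, dmin = i, d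
--     # (warn only in parent process; worker stays quiet)
--     return order[kmin:] + order[:kmin]
--
-- def order_raster_col(coords_sorted, start_rc=None, snake=False):
--     R, C, rmin, cmin, present = _normalize_grid(coords_sorted)
--     order = []
--     for cc in range(C):
--         rows = range(R-1, -1, -1) if (snake and cc % 2 == 1) else range(R)
--         for rr in rows:
--             if present[rr][cc]:
--                 order.append((rmin+rr, cmin+cc))
--     return _rotate_to_start(order, start_rc)
-- ===== SOURCE B (Python) =====
-- def order_raster_col(coords_sorted, start_rc=None, snake=False):
--     # Column-major order of the distinct points: sort by (col, signed-row) instead of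
--     # scanning a dense R x C grid; then rotate to the first point nearest start_rc.
--     cmin = min(c for _, c in coords_sorted)
--     order = sorted(set(coords_sorted),
--                    key=lambda rc: (rc[1], -rc[0]) if snake and (rc[1] - cmin) % 2 == 1
--                    else (rc[1], rc[0]))
--     if start_rc is None:
--         return order
--     sr, sc = start_rc
--     k = min(range(len(order)), key=lambda i: abs(order[i][0] - sr) + abs(order[i][1] - sc))
--     return order[k:] + order[:k]
-- ===== Notes on version B (the rewrite author's own statement) =====
-- stated objective: faster
-- what changed: B sorts the distinct points by (column, parity-signed row) and rotates to the first index of minimal Manhattan distance, instead of building and scanning a dense R x C presence grid.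
import Mathlib
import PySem

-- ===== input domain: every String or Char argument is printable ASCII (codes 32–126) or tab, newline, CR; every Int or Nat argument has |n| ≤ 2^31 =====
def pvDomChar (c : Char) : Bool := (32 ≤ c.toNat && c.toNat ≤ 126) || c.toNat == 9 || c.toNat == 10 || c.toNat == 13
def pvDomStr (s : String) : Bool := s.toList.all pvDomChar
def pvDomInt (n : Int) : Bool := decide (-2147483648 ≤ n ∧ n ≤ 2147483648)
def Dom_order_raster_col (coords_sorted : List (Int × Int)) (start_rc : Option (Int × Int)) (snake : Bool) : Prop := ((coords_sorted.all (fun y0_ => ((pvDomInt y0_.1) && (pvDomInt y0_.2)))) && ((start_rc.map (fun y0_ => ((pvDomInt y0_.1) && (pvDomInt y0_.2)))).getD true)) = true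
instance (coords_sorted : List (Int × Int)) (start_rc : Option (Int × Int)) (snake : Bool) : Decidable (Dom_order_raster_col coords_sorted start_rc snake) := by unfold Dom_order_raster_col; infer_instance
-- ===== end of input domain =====

-- B replaces A's dense R×C grid scan by sorting the distinct points by (column, parity-signed row)
-- and rotating to the first point of minimal Manhattan distance; objective: faster on sparse grids.

-- ===== PORT A =====
-- _normalize_grid: `min`/`max` of an empty sequence raises ValueError → none there.
-- present[i][j] assignments always hit indices in range (0 ≤ r-rmin < R, 0 ≤ c-cmin < C),
-- so List.modify/List.set are exact here.
def pvNormalizeGrid (coords : List (Int × Int)) :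
    Option (Int × Int × Int × Int × List (List Bool)) :=
  match PySem.List.min? (coords.map Prod.fst) (fun x => x),
        PySem.List.max? (coords.map Prod.fst) (fun x => x),
        PySem.List.min? (coords.map Prod.snd) (fun x => x),
        PySem.List.max? (coords.map Prod.snd) (fun x => x) with
  | some rmin, some rmax, some cmin, some cmax =>
      let R := rmax - rmin + 1
      let C := cmax - cmin + 1
      let present0 := (PySem.List.pyRange 0 R 1).map (fun _ => List.replicate C.toNat false)
      let present := coords.foldl
        (fun g p => g.modify (p.1 - rmin).toNat (fun row => row.set (p.2 - cmin).toNat true))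
        present0
      some (R, C, rmin, cmin, present)
  | _, _, _, _ => none

-- _rotate_to_start; slices order[k:] + order[:k] have 0 ≤ k < len, so drop/take are exact.
def pvRotateToStart (order : List (Int × Int)) (start_rc : Option (Int × Int)) :
    List (Int × Int) :=
  match start_rc, order with
  | none, _ => order
  | some _, [] => order
  | some s, o0 :: _ =>
    if order.contains s then
      let k := (PySem.List.index? order s).getD 0
      order.drop k ++ order.take k
    else
      let km := (PySem.List.enumerate order).foldl
        (fun km p =>
          if |p.2.1 - s.1| + |p.2.2 - s.2| < km.2 then (p.1, |p.2.1 - s.1| + |p.2.2 - s.2|)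
          else km)
        (0, |o0.1 - s.1| + |o0.2 - s.2|)
      order.drop km.1.toNat ++ order.take km.1.toNat

def order_raster_col (coords_sorted : List (Int × Int)) (start_rc : Option (Int × Int)) (snake : Bool) : List (Int × Int) :=
  match pvNormalizeGrid coords_sorted with
  | none => []   -- unreachable under Pre_: A raises ValueError on empty input
  | some (R, C, rmin, cmin, present) =>
    let order := (PySem.List.pyRange 0 C 1).foldl (fun acc cc =>
      (if snake && (PySem.Int.mod cc 2 == 1)
        then PySem.List.pyRange (R-1) (-1) (-1)
        else PySem.List.pyRange 0 R 1).foldl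
        (fun acc2 rr =>
          if PySem.List.pyGetD (PySem.List.pyGetD present rr []) cc false
          then acc2 ++ [(rmin + rr, cmin + cc)] else acc2) acc) []
    pvRotateToStart order start_rc

-- ===== PORT B =====
-- min() of an empty sequence raises ValueError → none there; order[k:]+order[:k] with
-- 0 ≤ k < len is drop/take; min(range(len(order)), key=…) is min? over pyRange (first minimum).
def order_raster_col_alt (coords_sorted : List (Int × Int)) (start_rc : Option (Int × Int)) (snake : Bool) : List (Int × Int) :=
  match PySem.List.min? (coords_sorted.map Prod.snd) (fun x => x) with
  | none => []   -- unreachable under Pre_: B raises ValueError on empty input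
  | some cmin =>
    let order := PySem.List.sorted2 (PySem.Set.ofList coords_sorted)
      (fun rc => rc.2)
      (fun rc => if snake && (PySem.Int.mod (rc.2 - cmin) 2 == 1) then -rc.1 else rc.1)
    match start_rc with
    | none => order
    | some s =>
      let k := ((PySem.List.min? (PySem.List.pyRange 0 (order.length : Int) 1)
        (fun i => |(PySem.List.pyGetD order i ((0 : Int), (0 : Int))).1 - s.1|
                 + |(PySem.List.pyGetD order i ((0 : Int), (0 : Int))).2 - s.2|)).getD 0).toNat
      order.drop k ++ order.take k

-- ===== PRECONDITION & SPEC =====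
-- Pre_ excludes only the empty list, on which A raises ValueError (min() of empty sequence).
def Pre_order_raster_col (coords_sorted : List (Int × Int)) (start_rc : Option (Int × Int)) (snake : Bool) : Prop :=
  coords_sorted ≠ []
instance (coords_sorted : List (Int × Int)) (start_rc : Option (Int × Int)) (snake : Bool) : Decidable (Pre_order_raster_col coords_sorted start_rc snake) := by unfold Pre_order_raster_col; infer_instance

def pvWitness_order_raster_col : (List (Int × Int)) × (Option (Int × Int)) × Bool :=
  ([(0, 0), (1, 2), (0, 1)], some (1, 1), true)

def Spec_order_raster_col (coords_sorted : List (Int × Int)) (start_rc : Option (Int × Int)) (snake : Bool) (out : List (Int × Int)) : Prop := out = order_raster_col_alt coords_sorted start_rc snake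
instance (coords_sorted : List (Int × Int)) (start_rc : Option (Int × Int)) (snake : Bool) (out : List (Int × Int)) : Decidable (Spec_order_raster_col coords_sorted start_rc snake out) := by unfold Spec_order_raster_col; infer_instance

-- ===== CLAIM (what is proved, stated in full; the proofs are below) =====
def Claim_equal_order_raster_col : Prop := ∀ (coords_sorted : List (Int × Int)) (start_rc : Option (Int × Int)) (snake : Bool), Dom_order_raster_col coords_sorted start_rc snake → Pre_order_raster_col coords_sorted start_rc snake → Spec_order_raster_col coords_sorted start_rc snake (order_raster_col coords_sorted start_rc snake)

-- ===== LEMMAS AND PROOFS =====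

theorem pv_witness_ok :
    Dom_order_raster_col pvWitness_order_raster_col.1 pvWitness_order_raster_col.2.1 pvWitness_order_raster_col.2.2 ∧
    Pre_order_raster_col pvWitness_order_raster_col.1 pvWitness_order_raster_col.2.1 pvWitness_order_raster_col.2.2 := by
  constructor <;> decide


-- ascending and descending ranges as maps over List.range
theorem pv_range_up (n : Int) (h : 0 ≤ n) :
    PySem.List.pyRange 0 n 1 = (List.range n.toNat).map (Nat.cast : Nat → Int) := by
  simp only [PySem.List.pyRange]
  rcases lt_or_ge 0 n with h1 | h1
  · simp only [if_neg one_ne_zero, if_pos zero_lt_one, if_pos h1]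
    have hc : ((n - 0 + 1 - 1)/1).toNat = n.toNat := by
      rw [Int.ediv_one]; omega
    rw [hc]
    apply List.map_congr_left
    intro k _; ring
  · have : n = 0 := le_antisymm h1 h
    simp [this]

theorem pv_range_down (R : Int) (h : 0 ≤ R) :
    PySem.List.pyRange (R-1) (-1) (-1) = (List.range R.toNat).map (fun k : Nat => R - 1 - (k : Int)) := by
  simp only [PySem.List.pyRange]
  rcases lt_or_ge 0 R with h1 | h1
  · have h2 : (-1 : Int) < R - 1 := by omega
    have h3 : ¬ (0:Int) < -1 := by norm_num
    simp only [if_neg (by norm_num : (-1:Int) ≠ 0), if_neg h3, if_pos h2]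
    have hc : ((R - 1 - (-1) + -(-1) - 1)/(-(-1))).toNat = R.toNat := by
      norm_num
    rw [hc]
    apply List.map_congr_left
    intro k _; ring
  · have : R = 0 := le_antisymm h1 h
    simp [this]

-- grid lookup
def pvLook (g : List (List Bool)) (i j : Nat) : Bool := ((g[i]?.getD [])[j]?.getD false)

theorem pv_fold_len (rmin cmin : Int) (l : List (Int × Int)) :
    ∀ g : List (List Bool),
    (l.foldl (fun g p => g.modify (p.1 - rmin).toNat (fun row => row.set (p.2 - cmin).toNat true)) g).length
      = g.length := by
  induction l with
  | nil => intro g; rfl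
  | cons p l ih =>
    intro g
    simp only [List.foldl_cons]
    rw [ih]
    exact List.length_modify _ _ _

theorem pv_fold_rows (rmin cmin : Int) (Cn : Nat) (l : List (Int × Int)) :
    ∀ g : List (List Bool),
    (∀ i : Nat, i < g.length → ((g[i]?.getD []).length = Cn)) →
    (∀ i : Nat, i < g.length →
      ((((l.foldl (fun g p => g.modify (p.1 - rmin).toNat (fun row => row.set (p.2 - cmin).toNat true)) g)[i]?).getD []).length = Cn)) := by
  induction l with
  | nil => intro g hg; exact hg
  | cons p l ih =>
    intro g hg i hi
    simp only [List.foldl_cons]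
    have hlen : (g.modify (p.1 - rmin).toNat (fun row => row.set (p.2 - cmin).toNat true)).length = g.length :=
      List.length_modify _ _ _
    refine ih _ ?_ i (by omega)
    intro j hj
    rw [List.getElem?_modify]
    rw [hlen] at hj
    cases hgj : g[j]? with
    | none => simp_all
    | some row =>
      have hr : row.length = Cn := by have := hg j hj; rw [hgj] at this; simpa using this
      by_cases he : (p.1 - rmin).toNat = j <;> simp [he, hr]

theorem pv_look_foldl (rmin cmin : Int) (Cn : Nat) (l : List (Int × Int)) :
    ∀ g : List (List Bool),
    (∀ i : Nat, i < g.length → ((g[i]?.getD []).length = Cn)) →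
    (∀ p ∈ l, 0 ≤ p.1 - rmin ∧ (p.1 - rmin) < (g.length : Int) ∧ 0 ≤ p.2 - cmin ∧ (p.2 - cmin) < (Cn : Int)) →
    ∀ i j : Nat,
    pvLook (l.foldl (fun g p => g.modify (p.1 - rmin).toNat (fun row => row.set (p.2 - cmin).toNat true)) g) i j
      = (pvLook g i j || l.any (fun p => decide (p.1 - rmin = (i:Int) ∧ p.2 - cmin = (j:Int)))) := by
  induction l with
  | nil => intro g _ _ i j; simp
  | cons p l ih =>
    intro g hrow hb i j
    simp only [List.foldl_cons, List.any_cons]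
    have hlen : (g.modify (p.1 - rmin).toNat (fun row => row.set (p.2 - cmin).toNat true)).length = g.length :=
      List.length_modify _ _ _
    have hbp := hb p (List.mem_cons_self)
    -- row invariant for the modified grid
    have hrow' : ∀ i : Nat, i < (g.modify (p.1 - rmin).toNat (fun row => row.set (p.2 - cmin).toNat true)).length →
        (((g.modify (p.1 - rmin).toNat (fun row => row.set (p.2 - cmin).toNat true))[i]?).getD []).length = Cn := by
      intro k hk
      rw [List.getElem?_modify]
      rw [hlen] at hk
      cases hgk : g[k]? with
      | none => simp_all
      | some row =>
        have hr : row.length = Cn := by have := hrow k hk; rw [hgk] at this; simpa using this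
        by_cases he : (p.1 - rmin).toNat = k <;> simp [he, hr]
    rw [ih _ hrow' (by rw [hlen]; exact fun q hq => hb q (List.mem_cons_of_mem _ hq)) i j]
    -- single-step lookup change
    have hstep : pvLook (g.modify (p.1 - rmin).toNat (fun row => row.set (p.2 - cmin).toNat true)) i j
        = (pvLook g i j || decide (p.1 - rmin = (i:Int) ∧ p.2 - cmin = (j:Int))) := by
      unfold pvLook
      rw [List.getElem?_modify]
      cases hgi : g[i]? with
      | none =>
        have hge : g.length ≤ i := by
          by_contra hlt
          exact absurd hgi (by simp [List.getElem?_eq_some_iff]; omega)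
        have : ¬ (p.1 - rmin = (i:Int)) := by omega
        simp [this]
      | some row =>
        have hil : i < g.length := (List.getElem?_eq_some_iff.mp hgi).1
        have hrl : row.length = Cn := by have := hrow i hil; rw [hgi] at this; simpa using this
        by_cases he : (p.1 - rmin).toNat = i
        · have hei : p.1 - rmin = (i : Int) := by omega
          simp only [Option.map_eq_map, Option.map_some, Option.getD_some, if_pos he]
          rw [List.getElem?_set]
          by_cases hej : (p.2 - cmin).toNat = j
          · have hejj : p.2 - cmin = (j : Int) := by omega
            have hbl : (p.2 - cmin).toNat < row.length := by omega
            have hjl : j < row.length := by omega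
            simp [hej, hjl, hei, hejj]
          · have : ¬ (p.2 - cmin = (j : Int)) := by omega
            simp [hej, this]
        · have hne : ¬ (p.1 - rmin = (i:Int)) := by omega
          simp only [Option.map_eq_map, Option.map_some, Option.getD_some, if_neg he]
          simp [hne]
    rw [hstep]
    cases pvLook g i j <;> cases hd : decide (p.1 - rmin = (i:Int) ∧ p.2 - cmin = (j:Int)) <;> simp [hd]

-- sorted2 is sorted with the lexicographic key
theorem pv_sorted2_eq_sorted {α : Type} (xs : List α) (k1 k2 : α → Int) :
    PySem.List.sorted2 xs k1 k2 false
      = PySem.List.sorted xs (fun x => toLex (k1 x, k2 x)) false := by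
  have hb : (fun a b : α => decide (k1 a < k1 b) || (!decide (k1 b < k1 a) && decide (k2 a < k2 b)))
      = (fun a b : α => decide (toLex (k1 a, k2 a) < toLex (k1 b, k2 b))) := by
    funext a b
    rcases lt_trichotomy (k1 a) (k1 b) with h | h | h
    · simp [Prod.Lex.lt_iff, h, not_lt.mpr (le_of_lt h)]
    · simp [Prod.Lex.lt_iff, h]
    · simp [Prod.Lex.lt_iff, h, not_lt.mpr (le_of_lt h), h.ne']
  rw [PySem.List.sorted_eq_foldl_insertBy]
  simp only [PySem.List.sorted2, Bool.false_eq_true, if_false]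
  rw [hb]

-- A's grid scan produces exactly B's sorted list
theorem pv_scan_eq (coords : List (Int × Int)) (snake : Bool)
    (rmin rmax cmin cmax : Int)
    (h1 : PySem.List.min? (coords.map Prod.fst) (fun x => x) = some rmin)
    (h2 : PySem.List.max? (coords.map Prod.fst) (fun x => x) = some rmax)
    (h3 : PySem.List.min? (coords.map Prod.snd) (fun x => x) = some cmin)
    (h4 : PySem.List.max? (coords.map Prod.snd) (fun x => x) = some cmax) :
    (PySem.List.pyRange 0 (cmax - cmin + 1) 1).foldl (fun acc cc =>
      (if snake && (PySem.Int.mod cc 2 == 1)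
        then PySem.List.pyRange ((rmax - rmin + 1)-1) (-1) (-1)
        else PySem.List.pyRange 0 (rmax - rmin + 1) 1).foldl
        (fun acc2 rr =>
          if PySem.List.pyGetD (PySem.List.pyGetD
              (coords.foldl
                (fun g p => g.modify (p.1 - rmin).toNat (fun row => row.set (p.2 - cmin).toNat true))
                ((PySem.List.pyRange 0 (rmax - rmin + 1) 1).map (fun _ => List.replicate (cmax - cmin + 1).toNat false))) rr []) cc false
          then acc2 ++ [(rmin + rr, cmin + cc)] else acc2) acc) []
    = PySem.List.sorted2 (PySem.Set.ofList coords) (fun rc => rc.2)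
        (fun rc => if snake && (PySem.Int.mod (rc.2 - cmin) 2 == 1) then -rc.1 else rc.1) := by
  -- abbreviations
  set R : Int := rmax - rmin + 1 with hRdef
  set C : Int := cmax - cmin + 1 with hCdef
  set present : List (List Bool) := coords.foldl
      (fun g p => g.modify (p.1 - rmin).toNat (fun row => row.set (p.2 - cmin).toNat true))
      ((PySem.List.pyRange 0 R 1).map (fun _ => List.replicate C.toNat false)) with hPdef
  -- bounds on members
  have hrlo : ∀ p ∈ coords, rmin ≤ p.1 := fun p hp =>
    PySem.List.min?_isMin h1 p.1 (List.mem_map_of_mem hp)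
  have hrhi : ∀ p ∈ coords, p.1 ≤ rmax := fun p hp =>
    PySem.List.max?_isMax h2 p.1 (List.mem_map_of_mem hp)
  have hclo : ∀ p ∈ coords, cmin ≤ p.2 := fun p hp =>
    PySem.List.min?_isMin h3 p.2 (List.mem_map_of_mem hp)
  have hchi : ∀ p ∈ coords, p.2 ≤ cmax := fun p hp =>
    PySem.List.max?_isMax h4 p.2 (List.mem_map_of_mem hp)
  have hp0 : rmin ∈ coords.map Prod.fst := PySem.List.min?_mem h1
  obtain ⟨p0, hp0mem, _⟩ := List.mem_map.mp hp0
  have hRpos : 0 < R := by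
    have := hrlo p0 hp0mem; have := hrhi p0 hp0mem; omega
  have hCpos : 0 < C := by
    have := hclo p0 hp0mem; have := hchi p0 hp0mem; omega
  have hRcast : ((R.toNat : Int)) = R := by omega
  have hCcast : ((C.toNat : Int)) = C := by omega
  -- present0 invariants
  have hlen0 : ((PySem.List.pyRange 0 R 1).map (fun _ => List.replicate C.toNat false)).length = R.toNat := by
    rw [pv_range_up R (le_of_lt hRpos)]; simp
  have hrow0 : ∀ i : Nat, i < ((PySem.List.pyRange 0 R 1).map (fun _ => List.replicate C.toNat false)).length →
      ((((PySem.List.pyRange 0 R 1).map (fun _ => List.replicate C.toNat false))[i]?).getD []).length = C.toNat := by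
    intro i hi
    rw [List.getElem?_eq_getElem hi]
    simp [List.getElem_map]
  -- present invariants
  have hplen : present.length = R.toNat := by
    rw [hPdef, pv_fold_len, hlen0]
  have hprow : ∀ i : Nat, i < R.toNat → ((present[i]?).getD []).length = C.toNat := by
    rw [hPdef]
    intro i hi
    exact pv_fold_rows rmin cmin C.toNat coords _ hrow0 i (by rw [hlen0]; exact hi)
  -- lookup characterization
  have hlook : ∀ i j : Nat, i < R.toNat → j < C.toNat →
      pvLook present i j = decide ((rmin + (i:Int), cmin + (j:Int)) ∈ coords) := by
    intro i j hi hj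
    rw [hPdef, pv_look_foldl rmin cmin C.toNat coords _ hrow0]
    · have h0 : pvLook ((PySem.List.pyRange 0 R 1).map (fun _ => List.replicate C.toNat false)) i j = false := by
        unfold pvLook
        rw [List.getElem?_map]
        cases hgi : (PySem.List.pyRange 0 R 1)[i]? with
        | none => simp
        | some a =>
          simp only [Option.map_some, Option.getD_some, List.getElem?_replicate]
          split <;> rfl
      rw [h0]
      rw [Bool.false_or]
      rcases hmem : decide ((rmin + (i:Int), cmin + (j:Int)) ∈ coords) with _ | _
      · simp only [List.any_eq_false]
        intro p hp
        have : ¬ ((rmin + (i:Int), cmin + (j:Int)) ∈ coords) := of_decide_eq_false hmem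
        simp only [decide_eq_true_eq]
        intro hcon
        apply this
        have : p = (rmin + (i:Int), cmin + (j:Int)) := by
          apply Prod.ext <;> simp <;> omega
        rw [← this]; exact hp
      · have hmem' : (rmin + (i:Int), cmin + (j:Int)) ∈ coords := of_decide_eq_true hmem
        simp only [List.any_eq_true]
        exact ⟨_, hmem', by simp⟩
    · intro p hp
      have := hrlo p hp; have := hrhi p hp; have := hclo p hp; have := hchi p hp
      rw [hlen0]
      omega
  have hq : ∀ rr cc : Int, 0 ≤ rr → rr < R → 0 ≤ cc → cc < C →
      (PySem.List.pyGetD (PySem.List.pyGetD present rr []) cc false)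
        = decide ((rmin + rr, cmin + cc) ∈ coords) := by
    intro rr cc hrr0 hrrR hcc0 hccC
    have hrn : rr.toNat < R.toNat := by omega
    have hcn : cc.toNat < C.toNat := by omega
    have hrn' : rr.toNat < present.length := by rw [hplen]; exact hrn
    have e : PySem.List.pyGetD (PySem.List.pyGetD present rr []) cc false
        = pvLook present rr.toNat cc.toNat := by
      unfold pvLook
      rw [List.getElem?_eq_getElem hrn', Option.getD_some]
      have hcl : cc.toNat < present[rr.toNat].length := by
        have := hprow rr.toNat hrn
        rw [List.getElem?_eq_getElem hrn', Option.getD_some] at this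
        omega
      rw [List.getElem?_eq_getElem hcl, Option.getD_some]
      rw [PySem.List.pyGetD_eq_getElem present [] hrr0 (by rw [hplen]; omega)]
      rw [PySem.List.pyGetD_eq_getElem _ false hcc0 (by omega)]
    rw [e]
    rw [hlook rr.toNat cc.toNat hrn hcn]
    have t1 : ((rr.toNat : Int)) = rr := by omega
    have t2 : ((cc.toNat : Int)) = cc := by omega
    rw [t1, t2]
  -- per-column lists
  set gcol : Int → List (Int × Int) := fun cc =>
    ((if snake && (PySem.Int.mod cc 2 == 1)
        then PySem.List.pyRange (R-1) (-1) (-1)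
        else PySem.List.pyRange 0 R 1).filter
      (fun rr => PySem.List.pyGetD (PySem.List.pyGetD present rr []) cc false)).map
      (fun rr => (rmin + rr, cmin + cc)) with hgcol
  have hinner : ∀ (cc : Int) (acc : List (Int × Int)),
      ((if snake && (PySem.Int.mod cc 2 == 1)
        then PySem.List.pyRange (R-1) (-1) (-1)
        else PySem.List.pyRange 0 R 1).foldl
        (fun acc2 rr => if PySem.List.pyGetD (PySem.List.pyGetD present rr []) cc false
          then acc2 ++ [(rmin + rr, cmin + cc)] else acc2) acc)
      = acc ++ gcol cc := by
    intro cc acc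
    rw [hgcol]
    exact PySem.List.foldl_append_if _ _ _ _
  have houter : (PySem.List.pyRange 0 C 1).foldl (fun acc cc =>
      (if snake && (PySem.Int.mod cc 2 == 1)
        then PySem.List.pyRange (R-1) (-1) (-1)
        else PySem.List.pyRange 0 R 1).foldl
        (fun acc2 rr => if PySem.List.pyGetD (PySem.List.pyGetD present rr []) cc false
          then acc2 ++ [(rmin + rr, cmin + cc)] else acc2) acc) []
      = (PySem.List.pyRange 0 C 1).flatMap gcol := by
    have hfun : (fun (acc : List (Int × Int)) (cc : Int) =>
      (if snake && (PySem.Int.mod cc 2 == 1)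
        then PySem.List.pyRange (R-1) (-1) (-1)
        else PySem.List.pyRange 0 R 1).foldl
        (fun acc2 rr => if PySem.List.pyGetD (PySem.List.pyGetD present rr []) cc false
          then acc2 ++ [(rmin + rr, cmin + cc)] else acc2) acc)
        = (fun acc cc => acc ++ gcol cc) := by
      funext acc cc
      exact hinner cc acc
    rw [hfun, PySem.List.foldl_append_eq_flatMap]
    rfl
  rw [houter]
  -- membership of the row lists
  have hrowsmem : ∀ (b : Bool) (rr : Int),
      (rr ∈ (if b then PySem.List.pyRange (R-1) (-1) (-1) else PySem.List.pyRange 0 R 1))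
        ↔ (0 ≤ rr ∧ rr < R) := by
    intro b rr
    cases b
    · simpa using PySem.List.mem_pyRange_one
    · simp only [if_true]
      rw [pv_range_down R (le_of_lt hRpos)]
      simp only [List.mem_map, List.mem_range]
      constructor
      · rintro ⟨k, hk, rfl⟩; omega
      · rintro ⟨hl, hr⟩; exact ⟨(R - 1 - rr).toNat, by omega, by omega⟩
  -- membership of the scan
  have hmemL : ∀ a : Int × Int, a ∈ (PySem.List.pyRange 0 C 1).flatMap gcol ↔ a ∈ coords := by
    intro a
    rw [List.mem_flatMap]
    constructor
    · rintro ⟨cc, hcc, hag⟩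
      rw [PySem.List.mem_pyRange_one] at hcc
      rw [hgcol] at hag
      simp only [List.mem_map, List.mem_filter] at hag
      obtain ⟨rr, ⟨hrr, hqt⟩, rfl⟩ := hag
      rw [hrowsmem] at hrr
      rw [hq rr cc hrr.1 hrr.2 hcc.1 hcc.2] at hqt
      exact of_decide_eq_true hqt
    · intro ha
      refine ⟨a.2 - cmin, ?_, ?_⟩
      · rw [PySem.List.mem_pyRange_one]
        have := hclo a ha; have := hchi a ha
        omega
      · rw [hgcol]
        simp only [List.mem_map, List.mem_filter]
        refine ⟨a.1 - rmin, ⟨?_, ?_⟩, ?_⟩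
        · rw [hrowsmem]
          have := hrlo a ha; have := hrhi a ha
          omega
        · rw [hq (a.1 - rmin) (a.2 - cmin)
            (by have := hrlo a ha; omega) (by have := hrhi a ha; omega)
            (by have := hclo a ha; omega) (by have := hchi a ha; omega)]
          apply decide_eq_true
          have : (rmin + (a.1 - rmin), cmin + (a.2 - cmin)) = a := by
            apply Prod.ext <;> simp
          rw [this]; exact ha
        · apply Prod.ext <;> simp
  -- pairwise strictly increasing keys on the scan
  have hpwL : ((PySem.List.pyRange 0 C 1).flatMap gcol).Pairwise (fun a b =>
      (toLex (a.2, if snake && (PySem.Int.mod (a.2 - cmin) 2 == 1) then -a.1 else a.1))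
        < (toLex (b.2, if snake && (PySem.Int.mod (b.2 - cmin) 2 == 1) then -b.1 else b.1))) := by
    rw [List.flatMap_def, List.pairwise_flatten]
    constructor
    · intro l' hl'
      rw [List.mem_map] at hl'
      obtain ⟨cc, _, rfl⟩ := hl'
      rw [hgcol, List.pairwise_map]
      have hccmk : cmin + cc - cmin = cc := by ring
      cases hsn : snake && (PySem.Int.mod cc 2 == 1)
      · have hbase : (PySem.List.pyRange 0 R 1).Pairwise (fun a b : Int => a < b) := by
          rw [pv_range_up R (le_of_lt hRpos), List.pairwise_map]
          exact List.pairwise_lt_range.imp (fun h => by exact_mod_cast h)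
        simp only [hsn, Bool.false_eq_true, if_false]
        apply (hbase.filter _).imp
        intro rr rr' hlt
        rw [Prod.Lex.lt_iff]
        right
        refine ⟨rfl, ?_⟩
        show (if snake && (PySem.Int.mod (cmin + cc - cmin) 2 == 1) then -(rmin+rr) else (rmin+rr))
          < (if snake && (PySem.Int.mod (cmin + cc - cmin) 2 == 1) then -(rmin+rr') else (rmin+rr'))
        rw [hccmk, hsn]
        simp only [Bool.false_eq_true, reduceIte]
        omega
      · have hbase : (PySem.List.pyRange (R-1) (-1) (-1)).Pairwise (fun a b : Int => b < a) := by
          rw [pv_range_down R (le_of_lt hRpos), List.pairwise_map]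
          exact List.pairwise_lt_range.imp (fun h => by omega)
        simp only [if_true]
        apply (hbase.filter _).imp
        intro rr rr' hlt
        rw [Prod.Lex.lt_iff]
        right
        refine ⟨rfl, ?_⟩
        show (if snake && (PySem.Int.mod (cmin + cc - cmin) 2 == 1) then -(rmin+rr) else (rmin+rr))
          < (if snake && (PySem.Int.mod (cmin + cc - cmin) 2 == 1) then -(rmin+rr') else (rmin+rr'))
        rw [hccmk, hsn]
        simp only [reduceIte]
        omega
    · rw [List.pairwise_map]
      have hccpw : (PySem.List.pyRange 0 C 1).Pairwise (fun a b : Int => a < b) := by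
        rw [pv_range_up C (le_of_lt hCpos), List.pairwise_map]
        exact List.pairwise_lt_range.imp (fun h => by exact_mod_cast h)
      apply hccpw.imp
      intro cc cc' hlt x hx y hy
      rw [hgcol] at hx hy
      simp only [List.mem_map] at hx hy
      obtain ⟨rr, _, rfl⟩ := hx
      obtain ⟨rr', _, rfl⟩ := hy
      rw [Prod.Lex.lt_iff]
      left
      simp
      omega
  -- conclude via uniqueness of the sorted order
  rw [pv_sorted2_eq_sorted]
  refine (PySem.List.sorted_eq_of_perm_of_pairwise_lt _ _ _ ?_ hpwL).symm
  rw [List.perm_ext_iff_of_nodup ?nd (PySem.Set.nodup_ofList coords)]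
  case nd =>
    apply hpwL.imp
    intro a b hlt heq
    rw [heq] at hlt
    exact lt_irrefl _ hlt
  intro a
  rw [hmemL a, PySem.Set.mem_ofList]

-- rotation helpers
def pvKey (L : List (Int × Int)) (s : Int × Int) (i : Int) : Int :=
  |(PySem.List.pyGetD L i ((0 : Int), (0 : Int))).1 - s.1|
    + |(PySem.List.pyGetD L i ((0 : Int), (0 : Int))).2 - s.2|

theorem pv_pyRange_nil (a b : Int) (h : b ≤ a) : PySem.List.pyRange a b 1 = [] := by
  refine List.eq_nil_iff_forall_not_mem.mpr (fun x hx => ?_)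
  rw [PySem.List.mem_pyRange_one] at hx
  omega

theorem pv_min_cons (key : Int → Int) :
    ∀ (l : List Int) (x : Int),
    PySem.List.min? (x :: l) key
      = some (l.foldl (fun m i => if key i < key m then i else m) x) := by
  intro l
  induction l with
  | nil => intro x; rfl
  | cons y l ih =>
    intro x
    by_cases h : key y < key x
    · have h1 : PySem.List.min? (x :: y :: l) key = PySem.List.min? (y :: l) key := by
        simp [PySem.List.min?, h]
      rw [h1, ih]
      simp only [List.foldl_cons]
      rw [if_pos h]
    · have h1 : PySem.List.min? (x :: y :: l) key = PySem.List.min? (x :: l) key := by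
        simp [PySem.List.min?, h]
      rw [h1, ih]
      simp only [List.foldl_cons]
      rw [if_neg h]

theorem pv_fold_spec (key : Int → Int) (n : Int) :
    ∀ (cnt : Nat) (i0 km : Int), i0 + cnt = n → 0 ≤ km → km < i0 →
    (∀ j : Int, 0 ≤ j → j < i0 → key km ≤ key j) →
    (∀ j : Int, 0 ≤ j → j < km → key km < key j) →
    (0 ≤ ((PySem.List.pyRange i0 n 1).foldl (fun m i => if key i < key m then i else m) km)
     ∧ ((PySem.List.pyRange i0 n 1).foldl (fun m i => if key i < key m then i else m) km) < n
     ∧ (∀ j : Int, 0 ≤ j → j < n →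
         key ((PySem.List.pyRange i0 n 1).foldl (fun m i => if key i < key m then i else m) km) ≤ key j)
     ∧ (∀ j : Int, 0 ≤ j → j < ((PySem.List.pyRange i0 n 1).foldl (fun m i => if key i < key m then i else m) km) →
         key ((PySem.List.pyRange i0 n 1).foldl (fun m i => if key i < key m then i else m) km) < key j)) := by
  intro cnt
  induction cnt with
  | zero =>
    intro i0 km hn h0 hlt hmin hstrict
    rw [pv_pyRange_nil i0 n (by omega)]
    simp only [List.foldl_nil]
    exact ⟨h0, by omega, fun j hj0 hjn => hmin j hj0 (by omega), hstrict⟩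
  | succ cnt ih =>
    intro i0 km hn h0 hlt hmin hstrict
    rw [PySem.List.pyRange_one_cons (by omega : i0 < n)]
    simp only [List.foldl_cons]
    by_cases hc : key i0 < key km
    · rw [if_pos hc]
      refine ih (i0+1) i0 (by omega) (by omega) (by omega) ?_ ?_
      · intro j hj0 hji
        rcases lt_or_ge j i0 with h | h
        · exact le_trans (le_of_lt hc) (hmin j hj0 h)
        · have : j = i0 := by omega
          rw [this]
      · intro j hj0 hji
        exact lt_of_lt_of_le hc (hmin j hj0 hji)
    · rw [if_neg hc]
      refine ih (i0+1) km (by omega) h0 (by omega) ?_ hstrict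
      intro j hj0 hji
      rcases lt_or_ge j i0 with h | h
      · exact hmin j hj0 h
      · have : j = i0 := by omega
        rw [this]
        exact not_lt.mp hc

theorem pv_rot_sync (L : List (Int × Int)) (s : Int × Int) :
    ∀ (t : List (Int × Int)) (i0 km : Int), 0 ≤ i0 → L.drop i0.toNat = t → 0 ≤ km →
    (PySem.List.enumerate t i0).foldl
      (fun km p =>
        if |p.2.1 - s.1| + |p.2.2 - s.2| < km.2 then (p.1, |p.2.1 - s.1| + |p.2.2 - s.2|) else km)
      (km, pvKey L s km)
    = ((PySem.List.pyRange i0 (L.length : Int) 1).foldl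
        (fun m i => if pvKey L s i < pvKey L s m then i else m) km,
       pvKey L s ((PySem.List.pyRange i0 (L.length : Int) 1).foldl
        (fun m i => if pvKey L s i < pvKey L s m then i else m) km)) := by
  intro t
  induction t with
  | nil =>
    intro i0 km hi0 hdrop hkm
    have hlen : L.length ≤ i0.toNat := List.drop_eq_nil_iff.mp hdrop
    rw [pv_pyRange_nil i0 (L.length : Int) (by omega)]
    rfl
  | cons x t' ih =>
    intro i0 km hi0 hdrop hkm
    have hx : L[i0.toNat]? = some x := by rw [← List.head?_drop, hdrop]; rfl
    obtain ⟨hilt, hxv⟩ := List.getElem?_eq_some_iff.mp hx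
    have hkey : pvKey L s i0 = |x.1 - s.1| + |x.2 - s.2| := by
      unfold pvKey
      rw [PySem.List.pyGetD_eq_getElem _ _ hi0 (by omega), hxv]
    have hdrop' : L.drop (i0+1).toNat = t' := by
      have h1 : (i0+1).toNat = i0.toNat + 1 := by omega
      rw [h1, ← List.drop_drop (j := i0.toNat) (i := 1), hdrop, List.drop_one, List.tail_cons]
    have hen : PySem.List.enumerate (x :: t') i0 = (i0, x) :: PySem.List.enumerate t' (i0+1) := rfl
    rw [hen, PySem.List.pyRange_one_cons (by omega : i0 < (L.length : Int))]
    simp only [List.foldl_cons]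
    by_cases hc : pvKey L s i0 < pvKey L s km
    · rw [if_pos (show |x.1 - s.1| + |x.2 - s.2| < (km, pvKey L s km).2 from hkey ▸ hc),
        if_pos hc]
      have hacc : (((i0, x).1 : Int), |x.1 - s.1| + |x.2 - s.2|) = (i0, pvKey L s i0) := by
        rw [hkey]
      rw [hacc]
      exact ih (i0+1) i0 (by omega) hdrop' (by omega)
    · rw [if_neg (show ¬ (|x.1 - s.1| + |x.2 - s.2| < (km, pvKey L s km).2) from hkey ▸ hc),
        if_neg hc]
      exact ih (i0+1) km (by omega) hdrop' hkm

theorem pv_key_nonneg (L : List (Int × Int)) (s : Int × Int) (i : Int) : 0 ≤ pvKey L s i :=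
  add_nonneg (abs_nonneg _) (abs_nonneg _)

-- both rotations pick the first index of minimal Manhattan distance
theorem pv_rotate_eq (L : List (Int × Int)) (hL : L ≠ []) (s : Int × Int) :
    pvRotateToStart L (some s)
      = L.drop ((PySem.List.min? (PySem.List.pyRange 0 (L.length : Int) 1)
          (fun i => |(PySem.List.pyGetD L i ((0 : Int), (0 : Int))).1 - s.1|
                   + |(PySem.List.pyGetD L i ((0 : Int), (0 : Int))).2 - s.2|)).getD 0).toNat
        ++ L.take ((PySem.List.min? (PySem.List.pyRange 0 (L.length : Int) 1)
          (fun i => |(PySem.List.pyGetD L i ((0 : Int), (0 : Int))).1 - s.1|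
                   + |(PySem.List.pyGetD L i ((0 : Int), (0 : Int))).2 - s.2|)).getD 0).toNat := by
  cases L with
  | nil => exact absurd rfl hL
  | cons o0 t =>
  have hkeyfun : (fun i => |(PySem.List.pyGetD (o0 :: t) i ((0 : Int), (0 : Int))).1 - s.1|
      + |(PySem.List.pyGetD (o0 :: t) i ((0 : Int), (0 : Int))).2 - s.2|) = pvKey (o0 :: t) s := rfl
  rw [hkeyfun]
  have hnpos : 0 < ((o0 :: t).length : Int) := by simp
  have hcons : PySem.List.pyRange 0 ((o0 :: t).length : Int) 1
      = 0 :: PySem.List.pyRange 1 ((o0 :: t).length : Int) 1 :=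
    PySem.List.pyRange_one_cons hnpos
  have hmin : PySem.List.min? (PySem.List.pyRange 0 ((o0 :: t).length : Int) 1) (pvKey (o0 :: t) s)
      = some ((PySem.List.pyRange 1 ((o0 :: t).length : Int) 1).foldl
          (fun m i => if pvKey (o0 :: t) s i < pvKey (o0 :: t) s m then i else m) 0) := by
    rw [hcons]
    exact pv_min_cons (pvKey (o0 :: t) s) _ 0
  set q : Int := (PySem.List.pyRange 1 ((o0 :: t).length : Int) 1).foldl
      (fun m i => if pvKey (o0 :: t) s i < pvKey (o0 :: t) s m then i else m) 0 with hqdef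
  have hspec := pv_fold_spec (pvKey (o0 :: t) s) ((o0 :: t).length : Int)
    (((o0 :: t).length : Int) - 1).toNat 1 0
    (by omega) (by omega) (by omega)
    (fun j hj0 hj1 => by
      have hj : j = 0 := by omega
      rw [hj])
    (fun j hj0 hjk => by omega)
  rw [← hqdef] at hspec
  obtain ⟨hq0, hqn, hqmin, hqstrict⟩ := hspec
  have hqget : pvKey (o0 :: t) s q
      = |((o0 :: t)[q.toNat]'(by omega)).1 - s.1| + |((o0 :: t)[q.toNat]'(by omega)).2 - s.2| := by
    unfold pvKey
    rw [PySem.List.pyGetD_eq_getElem _ _ hq0 (by omega)]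
  rw [hmin]
  simp only [Option.getD_some, pvRotateToStart]
  by_cases hc : (o0 :: t).contains s
  · rw [if_pos hc]
    have hmem : s ∈ (o0 :: t) := List.contains_iff_mem.mp hc
    cases hidx : List.idxOf? s (o0 :: t) with
    | none => exact absurd hmem (List.idxOf?_eq_none_iff.mp hidx)
    | some p =>
      obtain ⟨hplen, hpv, hpfirst⟩ := List.idxOf?_eq_some_iff.mp hidx
      have hkeyp : pvKey (o0 :: t) s (p : Int) = 0 := by
        unfold pvKey
        rw [PySem.List.pyGetD_eq_getElem _ _ (by omega) (by exact_mod_cast hplen)]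
        simp only [Int.toNat_natCast, hpv]
        simp
      have hkeyq0 : pvKey (o0 :: t) s q = 0 := by
        have h1 := hqmin (p : Int) (by omega) (by exact_mod_cast hplen)
        rw [hkeyp] at h1
        exact le_antisymm h1 (pv_key_nonneg _ s q)
      have hqv : (o0 :: t)[q.toNat]'(by omega) = s := by
        rw [hqget] at hkeyq0
        have a1 := abs_nonneg (((o0 :: t)[q.toNat]'(by omega)).1 - s.1)
        have a2 := abs_nonneg (((o0 :: t)[q.toNat]'(by omega)).2 - s.2)
        have e1 : |((o0 :: t)[q.toNat]'(by omega)).1 - s.1| = 0 := by omega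
        have e2 : |((o0 :: t)[q.toNat]'(by omega)).2 - s.2| = 0 := by omega
        rw [abs_eq_zero] at e1 e2
        apply Prod.ext <;> omega
      have hqp : q.toNat = p := by
        rcases Nat.lt_trichotomy q.toNat p with h | h | h
        · exact absurd hqv (hpfirst q.toNat h)
        · exact h
        · exfalso
          have hs := hqstrict (p : Int) (by omega) (by omega)
          rw [hkeyp, hkeyq0] at hs
          exact lt_irrefl 0 hs
      have hidx' : PySem.List.index? (o0 :: t) s = some p := hidx
      rw [hidx']
      simp only [Option.getD_some]
      rw [hqp]
  · rw [if_neg hc]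
    have hen : PySem.List.enumerate (o0 :: t) = ((0 : Int), o0) :: PySem.List.enumerate t 1 := rfl
    have hkey0 : pvKey (o0 :: t) s 0 = |o0.1 - s.1| + |o0.2 - s.2| := by
      unfold pvKey
      rw [PySem.List.pyGetD_eq_getElem _ _ (by omega) (by simp)]
      simp
    rw [hen]
    simp only [List.foldl_cons]
    rw [if_neg (show ¬ (|o0.1 - s.1| + |o0.2 - s.2|
          < (((0 : Int), |o0.1 - s.1| + |o0.2 - s.2|)).2) from lt_irrefl _)]
    rw [← hkey0]
    have hsync := pv_rot_sync (o0 :: t) s t 1 0 (by omega) (by simp) (by omega)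
    rw [hsync]

-- ===== VERDICT (by name: the statement is the Claim_ definition above) =====
theorem order_raster_col_spec : Claim_equal_order_raster_col := by
  intro coords start snake _ hpre
  unfold Pre_order_raster_col at hpre
  unfold Spec_order_raster_col
  cases h1 : PySem.List.min? (coords.map Prod.fst) (fun x => x) with
  | none => exact absurd (by simpa using (PySem.List.min?_eq_none_iff _ _).mp h1) hpre
  | some rmin =>
  cases h2 : PySem.List.max? (coords.map Prod.fst) (fun x => x) with
  | none => exact absurd (by simpa using (PySem.List.max?_eq_none_iff _ _).mp h2) hpre
  | some rmax =>
  cases h3 : PySem.List.min? (coords.map Prod.snd) (fun x => x) with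
  | none => exact absurd (by simpa using (PySem.List.min?_eq_none_iff _ _).mp h3) hpre
  | some cmin =>
  cases h4 : PySem.List.max? (coords.map Prod.snd) (fun x => x) with
  | none => exact absurd (by simpa using (PySem.List.max?_eq_none_iff _ _).mp h4) hpre
  | some cmax =>
  have hLne : PySem.List.sorted2 (PySem.Set.ofList coords) (fun rc => rc.2)
      (fun rc => if snake && (PySem.Int.mod (rc.2 - cmin) 2 == 1) then -rc.1 else rc.1) ≠ [] := by
    obtain ⟨x, hx⟩ := List.exists_mem_of_ne_nil coords hpre
    have hxs : x ∈ PySem.Set.ofList coords := (PySem.Set.mem_ofList coords x).mpr hx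
    have hperm := PySem.List.sorted2_perm (PySem.Set.ofList coords) (fun rc : Int × Int => rc.2)
      (fun rc : Int × Int => if snake && (PySem.Int.mod (rc.2 - cmin) 2 == 1) then -rc.1 else rc.1) false
    intro hnil
    rw [hnil] at hperm
    exact absurd (hperm.symm.mem_iff.mp hxs) (List.not_mem_nil)
  simp only [order_raster_col, order_raster_col_alt, pvNormalizeGrid, h1, h2, h3, h4]
  rw [pv_scan_eq coords snake rmin rmax cmin cmax h1 h2 h3 h4]
  cases start with
  | none => rfl
  | some s => exact pv_rotate_eq _ hLne s
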